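-- pv_equiv track=rewrite | github.com/Magnesiumnuclear/EyeSeeMore | indexer.py | rotate_ocr_box
-- ===== SOURCE A (Python) =====
-- def rotate_ocr_box(box, orientation, raw_w, raw_h):
--     if orientation == 1: return box
--     new_box = []
--     for pt in box:
--         x, y = pt[0], pt[1]
--         if orientation == 2:   nx, ny = raw_w - x, y
--         elif orientation == 3: nx, ny = raw_w - x, raw_h - y
--         elif orientation == 4: nx, ny = x, raw_h - y
--         elif orientation == 5: nx, ny = y, x
--         elif orientation == 6: nx, ny = raw_h - y, x
--         elif orientation == 7: nx, ny = raw_h - y, raw_w - x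
--         elif orientation == 8: nx, ny = y, raw_w - x
--         else:                  nx, ny = x, y
--         new_box.append([nx, ny])
--     return new_box
-- ===== SOURCE B (Python) =====
-- def rotate_ocr_box(box, orientation, raw_w, raw_h):
--     # Decompose the EXIF orientation into elementary passes: extract the (x, y)
--     # pairs, optionally transpose, then optionally mirror horizontally and/or
--     # vertically -- each as its own whole-list pass.
--     if orientation == 1:
--         return box
--     pts = [[pt[0], pt[1]] for pt in box]
--     w, h = raw_w, raw_h
--     if orientation in (5, 6, 7, 8):      # transpose swaps axes (and the frame)
--         pts = [[y, x] for x, y in pts]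
--         w, h = raw_h, raw_w
--     if orientation in (2, 3, 6, 7):      # horizontal mirror
--         pts = [[w - x, y] for x, y in pts]
--     if orientation in (3, 4, 7, 8):      # vertical mirror
--         pts = [[x, h - y] for x, y in pts]
--     return pts
-- ===== Notes on version B (the rewrite author's own statement) =====
-- stated objective: alternative
-- what changed: Replaces the per-point 8-way orientation branch with a decomposition of each EXIF orientation into elementary geometric operations (transpose, horizontal mirror, vertical mirror) applied as separate staged whole-list passes.
import Mathlib
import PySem

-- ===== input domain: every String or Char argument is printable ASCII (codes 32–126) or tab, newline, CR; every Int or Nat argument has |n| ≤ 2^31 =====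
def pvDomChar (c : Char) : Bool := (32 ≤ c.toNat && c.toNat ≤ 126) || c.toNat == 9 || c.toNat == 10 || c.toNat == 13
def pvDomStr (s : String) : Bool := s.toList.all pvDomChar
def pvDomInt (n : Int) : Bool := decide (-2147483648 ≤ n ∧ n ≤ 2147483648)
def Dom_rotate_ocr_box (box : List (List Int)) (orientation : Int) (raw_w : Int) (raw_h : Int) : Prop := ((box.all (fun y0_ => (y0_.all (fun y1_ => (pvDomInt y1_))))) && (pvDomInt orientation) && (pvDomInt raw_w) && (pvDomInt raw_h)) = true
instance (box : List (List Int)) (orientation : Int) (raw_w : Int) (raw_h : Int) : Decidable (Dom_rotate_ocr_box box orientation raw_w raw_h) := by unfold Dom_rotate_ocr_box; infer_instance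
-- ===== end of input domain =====

-- B decomposes each EXIF orientation into elementary operations (transpose, horizontal
-- mirror, vertical mirror) applied as staged whole-list passes (alternative structure).

-- ===== PORT A =====
-- pt[0]/pt[1] are Python subscripts; under Pre_ (each point has ≥ 2 coordinates when
-- orientation ≠ 1) the lookup is in range; on shorter points Python raises IndexError.
def rotate_ocr_box (box : List (List Int)) (orientation : Int) (raw_w : Int) (raw_h : Int) : List (List Int) :=
  if orientation == 1 then box
  else
    box.foldl (fun new_box pt =>
      let x := (PySem.List.pyGet? pt 0).getD 0
      let y := (PySem.List.pyGet? pt 1).getD 0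
      let p : Int × Int :=
        if orientation == 2 then (raw_w - x, y)
        else if orientation == 3 then (raw_w - x, raw_h - y)
        else if orientation == 4 then (x, raw_h - y)
        else if orientation == 5 then (y, x)
        else if orientation == 6 then (raw_h - y, x)
        else if orientation == 7 then (raw_h - y, raw_w - x)
        else if orientation == 8 then (y, raw_w - x)
        else (x, y)
      new_box ++ [[p.1, p.2]]) []

-- ===== PORT B =====
-- B-side helpers: the elementary passes of Source B.
def pvXY (pt : List Int) : List Int :=
  [(PySem.List.pyGet? pt 0).getD 0, (PySem.List.pyGet? pt 1).getD 0]

def pvSwap (pt : List Int) : List Int := [pt.getD 1 0, pt.getD 0 0]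
def pvFlipX (w : Int) (pt : List Int) : List Int := [w - pt.getD 0 0, pt.getD 1 0]
def pvFlipY (h : Int) (pt : List Int) : List Int := [pt.getD 0 0, h - pt.getD 1 0]

def rotate_ocr_box_alt (box : List (List Int)) (orientation : Int) (raw_w : Int) (raw_h : Int) : List (List Int) :=
  if orientation == 1 then box
  else
    let pts0 := box.map pvXY
    let swapped := orientation == 5 || orientation == 6 || orientation == 7 || orientation == 8
    let pts1 := if swapped then pts0.map pvSwap else pts0
    let w := if swapped then raw_h else raw_w
    let h := if swapped then raw_w else raw_h
    let pts2 := if orientation == 2 || orientation == 3 || orientation == 6 || orientation == 7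
      then pts1.map (pvFlipX w) else pts1
    if orientation == 3 || orientation == 4 || orientation == 7 || orientation == 8
      then pts2.map (pvFlipY h) else pts2

-- ===== PRECONDITION & SPEC =====
-- Pre_ excludes exactly the inputs where Python A raises IndexError: some point with
-- fewer than 2 coordinates while orientation ≠ 1 (orientation == 1 returns box untouched).
def Pre_rotate_ocr_box (box : List (List Int)) (orientation : Int) (raw_w : Int) (raw_h : Int) : Prop :=
  orientation = 1 ∨ ∀ pt ∈ box, 2 ≤ pt.length
instance (box : List (List Int)) (orientation : Int) (raw_w : Int) (raw_h : Int) : Decidable (Pre_rotate_ocr_box box orientation raw_w raw_h) := by unfold Pre_rotate_ocr_box; infer_instance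

def pvWitness_rotate_ocr_box : List (List Int) × Int × Int × Int := ([[0, 0], [3, 1], [3, 4], [0, 4]], 6, 10, 20)

def Spec_rotate_ocr_box (box : List (List Int)) (orientation : Int) (raw_w : Int) (raw_h : Int) (out : List (List Int)) : Prop := out = rotate_ocr_box_alt box orientation raw_w raw_h
instance (box : List (List Int)) (orientation : Int) (raw_w : Int) (raw_h : Int) (out : List (List Int)) : Decidable (Spec_rotate_ocr_box box orientation raw_w raw_h out) := by unfold Spec_rotate_ocr_box; infer_instance

-- ===== CLAIM (what is proved, stated in full; the proofs are below) =====
def Claim_equal_rotate_ocr_box : Prop := ∀ (box : List (List Int)) (orientation : Int) (raw_w : Int) (raw_h : Int), Dom_rotate_ocr_box box orientation raw_w raw_h → Pre_rotate_ocr_box box orientation raw_w raw_h → Spec_rotate_ocr_box box orientation raw_w raw_h (rotate_ocr_box box orientation raw_w raw_h)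

-- ===== LEMMAS AND PROOFS =====

-- A's per-point computation, named so the proofs can talk about it.
def pvPtA (orientation : Int) (raw_w : Int) (raw_h : Int) (pt : List Int) : List Int :=
  let x := (PySem.List.pyGet? pt 0).getD 0
  let y := (PySem.List.pyGet? pt 1).getD 0
  let p : Int × Int :=
    if orientation == 2 then (raw_w - x, y)
    else if orientation == 3 then (raw_w - x, raw_h - y)
    else if orientation == 4 then (x, raw_h - y)
    else if orientation == 5 then (y, x)
    else if orientation == 6 then (raw_h - y, x)
    else if orientation == 7 then (raw_h - y, raw_w - x)
    else if orientation == 8 then (y, raw_w - x)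
    else (x, y)
  [p.1, p.2]

-- B's staged passes fused into one per-point function (for the pointwise comparison).
def pvPtB (orientation : Int) (raw_w : Int) (raw_h : Int) (pt : List Int) : List Int :=
  let swapped := orientation == 5 || orientation == 6 || orientation == 7 || orientation == 8
  let w := if swapped then raw_h else raw_w
  let h := if swapped then raw_w else raw_h
  let p1 := if swapped then pvSwap (pvXY pt) else pvXY pt
  let p2 := if orientation == 2 || orientation == 3 || orientation == 6 || orientation == 7
    then pvFlipX w p1 else p1
  if orientation == 3 || orientation == 4 || orientation == 7 || orientation == 8
    then pvFlipY h p2 else p2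

-- A's append-accumulating foldl is a map.
theorem pv_foldl_append_map {α β : Type} (f : α → β) (xs : List α) (acc : List β) :
    xs.foldl (fun nb pt => nb ++ [f pt]) acc = acc ++ xs.map f := by
  induction xs generalizing acc with
  | nil => simp
  | cons h t ih => simp [List.foldl, ih]

theorem pvA_eq_map (box : List (List Int)) (orientation raw_w raw_h : Int)
    (h1 : ¬ orientation = 1) :
    rotate_ocr_box box orientation raw_w raw_h = box.map (pvPtA orientation raw_w raw_h) := by
  have hb : ¬ ((orientation == 1) = true) := by simp [h1]
  unfold rotate_ocr_box
  rw [if_neg hb]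
  exact (pv_foldl_append_map (pvPtA orientation raw_w raw_h) box []).trans (List.nil_append _)

theorem pvB_eq_map (box : List (List Int)) (orientation raw_w raw_h : Int)
    (h1 : ¬ orientation = 1) :
    rotate_ocr_box_alt box orientation raw_w raw_h = box.map (pvPtB orientation raw_w raw_h) := by
  have hb : ¬ ((orientation == 1) = true) := by simp [h1]
  unfold rotate_ocr_box_alt
  rw [if_neg hb]
  cases hswap : (orientation == 5 || orientation == 6 || orientation == 7 || orientation == 8) <;>
  cases hfx : (orientation == 2 || orientation == 3 || orientation == 6 || orientation == 7) <;>
  cases hfy : (orientation == 3 || orientation == 4 || orientation == 7 || orientation == 8) <;>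
    simp [pvPtB, hswap, hfx, hfy, List.map_map, Function.comp]

theorem pvPt_eq (orientation raw_w raw_h : Int) (pt : List Int) :
    pvPtA orientation raw_w raw_h pt = pvPtB orientation raw_w raw_h pt := by
  by_cases h2 : orientation = 2
  · subst h2; simp [pvPtA, pvPtB, pvXY, pvSwap, pvFlipX, pvFlipY, List.getD]
  by_cases h3 : orientation = 3
  · subst h3; simp [pvPtA, pvPtB, pvXY, pvSwap, pvFlipX, pvFlipY, List.getD]
  by_cases h4 : orientation = 4
  · subst h4; simp [pvPtA, pvPtB, pvXY, pvSwap, pvFlipX, pvFlipY, List.getD]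
  by_cases h5 : orientation = 5
  · subst h5; simp [pvPtA, pvPtB, pvXY, pvSwap, pvFlipX, pvFlipY, List.getD]
  by_cases h6 : orientation = 6
  · subst h6; simp [pvPtA, pvPtB, pvXY, pvSwap, pvFlipX, pvFlipY, List.getD]
  by_cases h7 : orientation = 7
  · subst h7; simp [pvPtA, pvPtB, pvXY, pvSwap, pvFlipX, pvFlipY, List.getD]
  by_cases h8 : orientation = 8
  · subst h8; simp [pvPtA, pvPtB, pvXY, pvSwap, pvFlipX, pvFlipY, List.getD]
  · simp [pvPtA, pvPtB, pvXY, pvSwap, pvFlipX, pvFlipY, List.getD, h2, h3, h4, h5, h6, h7, h8]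

-- ===== VERDICT (by name: the statement is the Claim_ definition above) =====
theorem rotate_ocr_box_spec : Claim_equal_rotate_ocr_box := by
  intro box orientation raw_w raw_h _ _
  unfold Spec_rotate_ocr_box
  by_cases h1 : orientation = 1
  · unfold rotate_ocr_box rotate_ocr_box_alt; simp [h1]
  · rw [pvA_eq_map box orientation raw_w raw_h h1, pvB_eq_map box orientation raw_w raw_h h1]
    exact List.map_congr_left (fun pt _ => pvPt_eq orientation raw_w raw_h pt)
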